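-- pv_equiv track=rewrite | github.com/T-Burton-ND/Util | Visualization_Scripts/callgraph.py | _layer_by_bfs
-- ===== SOURCE A (Python) =====
-- from typing import Iterable, Optional, Set, Tuple, Dict, List
--
-- def _build_adj(edges: Iterable[Tuple[str,str]]) -> Dict[str, Set[str]]:
--     adj: Dict[str, Set[str]] = {}
--     for a, b in edges:
--         adj.setdefault(a, set()).add(b)
--         adj.setdefault(b, set())
--     return adj
--
-- def _layer_by_bfs(edges: Iterable[Tuple[str,str]], root: str) -> Dict[str, int]:
--     """Compute BFS layers (distance from root) on directed edges."""
--     adj = _build_adj(edges)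
--     layer: Dict[str, int] = {}
--     if root not in adj:  # root might be the qualified caller
--         # Sometimes the exact qualified name used in edges differs slightly.
--         # Fall back to the first node that startswith root if present.
--         for n in adj:
--             if n.endswith(root) or n.startswith(root):
--                 root = n
--                 break
--         else:
--             return layer
--     from collections import deque
--     dq = deque([(root, 0)])
--     layer[root] = 0
--     while dq:
--         u, d = dq.popleft()
--         for v in adj.get(u, ()):
--             if v not in layer:
--                 layer[v] = d + 1
--                 dq.append((v, d + 1))
--     return layer
-- ===== SOURCE B (Python) =====
-- from typing import Iterable, Optional, Set, Tuple, Dict, List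
--
-- def _build_adj(edges: Iterable[Tuple[str,str]]) -> Dict[str, Set[str]]:
--     adj: Dict[str, Set[str]] = {}
--     for a, b in edges:
--         adj.setdefault(a, set()).add(b)
--         adj.setdefault(b, set())
--     return adj
--
-- def _layer_by_bfs(edges: Iterable[Tuple[str,str]], root: str) -> Dict[str, int]:
--     """Compute BFS layers in two stages: first the list of BFS levels (flatten the
--     neighbours of a whole level, then prune that candidate list against a seen set),
--     then materialise the distance dict once at the end from the enumerated levels."""
--     adj = _build_adj(edges)
--     if root not in adj:  # root might be the qualified caller
--         for n in adj:
--             if n.endswith(root) or n.startswith(root):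
--                 root = n
--                 break
--         else:
--             return {}
--     levels: List[List[str]] = []
--     frontier, seen = [root], {root}
--     while frontier:
--         levels.append(frontier)
--         candidates = [v for u in frontier for v in adj.get(u, ())]
--         frontier = []
--         for v in candidates:
--             if v not in seen:
--                 seen.add(v)
--                 frontier.append(v)
--     return {n: d for d, lvl in enumerate(levels) for n in lvl}
-- ===== Notes on version B (the rewrite author's own statement) =====
-- stated objective: alternative
-- what changed: A runs one mutating loop over a deque of (node,distance) pairs, writing distances into the output dict as it dequeues; B stores no distances during traversal: it first computes the list of BFS levels (flattening a level's neighbours into one candidate list, then pruning it against a separate seen set) and materialises the dict only at the end by a comprehension over enumerate(levels).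
import Mathlib
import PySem

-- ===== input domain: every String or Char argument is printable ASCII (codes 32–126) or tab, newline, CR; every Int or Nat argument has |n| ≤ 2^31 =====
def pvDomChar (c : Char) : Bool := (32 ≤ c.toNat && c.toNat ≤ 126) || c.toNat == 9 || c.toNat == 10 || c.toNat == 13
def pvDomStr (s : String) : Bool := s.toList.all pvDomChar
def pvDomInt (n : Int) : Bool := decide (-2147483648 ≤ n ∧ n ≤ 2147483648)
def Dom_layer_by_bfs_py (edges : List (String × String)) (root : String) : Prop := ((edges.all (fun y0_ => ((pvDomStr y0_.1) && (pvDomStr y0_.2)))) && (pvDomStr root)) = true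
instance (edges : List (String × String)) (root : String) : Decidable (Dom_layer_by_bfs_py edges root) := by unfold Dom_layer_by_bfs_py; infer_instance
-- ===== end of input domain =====

-- B replaces A's mutating (node,distance)-deque loop by a two-stage computation: first the list
-- of BFS levels (flatten a level's neighbours, prune against a seen set), then the dict is built
-- once at the end from the enumerated levels; same _build_adj and root fallback; equivalence is exact.
-- The Nat fuel in both loop ports is only a totality guard (proved never to run out).

-- ===== PORT A =====
-- shared helper: _build_adj (identical in Source A and Source B)
def pvBuildAdj (edges : List (String × String)) : PySem.Dict String (PySem.Set String) :=
  edges.foldl (fun adj e =>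
    PySem.Dict.setdefault
      (PySem.Dict.insert adj e.1 (PySem.Set.add (PySem.Dict.getD adj e.1 PySem.Set.empty) e.2))
      e.2 PySem.Set.empty)
    PySem.Dict.empty

-- shared helper: the root-resolution fallback (identical in Source A and Source B)
def pvResolveRoot (adj : PySem.Dict String (PySem.Set String)) (root : String) : Option String :=
  if PySem.Dict.contains adj root then some root
  else (PySem.Dict.keys adj).find? (fun n => PySem.Str.endswith n root || PySem.Str.startswith n root)

-- A's deque loop: pop (u,d) from the front, append fresh neighbours as (v,d+1)
def pvBfsA (adj : PySem.Dict String (PySem.Set String)) :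
    Nat → PySem.Dict String Int → List (String × Int) → PySem.Dict String Int
  | 0, layer, _ => layer
  | _ + 1, layer, [] => layer
  | fuel + 1, layer, (u, d) :: rest =>
    let st := (PySem.Dict.getD adj u PySem.Set.empty).foldl
      (fun (st : PySem.Dict String Int × List (String × Int)) v =>
        if PySem.Dict.contains st.1 v then st
        else (PySem.Dict.insert st.1 v (d + 1), st.2 ++ [(v, d + 1)]))
      (layer, rest)
    pvBfsA adj fuel st.1 st.2

def layer_by_bfs_py (edges : List (String × String)) (root : String) : List (String × Int) :=
  let adj := pvBuildAdj edges
  match pvResolveRoot adj root with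
  | none => []
  | some r =>
    (pvBfsA adj (2 * edges.length + 1) (PySem.Dict.insert PySem.Dict.empty r 0) [(r, 0)]).items

-- ===== PORT B =====
-- B's level collector: flatten the frontier's neighbours into one candidate list, then prune it
-- against the seen set, keeping first occurrences; recurse on the next frontier
def pvLevels (adj : PySem.Dict String (PySem.Set String)) :
    Nat → List String → PySem.Set String → List (List String)
  | 0, _, _ => []
  | fuel + 1, frontier, seen =>
    if frontier.isEmpty then []
    else
      let cand := frontier.flatMap (fun u => PySem.Dict.getD adj u PySem.Set.empty)
      let st := cand.foldl
        (fun (st : List String × PySem.Set String) v =>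
          if PySem.Set.contains st.2 v then st else (st.1 ++ [v], PySem.Set.add st.2 v))
        ([], seen)
      frontier :: pvLevels adj fuel st.1 st.2

def layer_by_bfs_py_alt (edges : List (String × String)) (root : String) : List (String × Int) :=
  let adj := pvBuildAdj edges
  match pvResolveRoot adj root with
  | none => []
  | some r =>
    ((PySem.List.enumerate
        (pvLevels adj (2 * edges.length + 1) [r] (PySem.Set.add PySem.Set.empty r)) 0).foldl
      (fun d p => p.2.foldl (fun d n => PySem.Dict.insert d n p.1) d)
      PySem.Dict.empty).items

-- ===== PRECONDITION & SPEC =====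
def Spec_layer_by_bfs_py (edges : List (String × String)) (root : String) (out : List (String × Int)) : Prop := out = layer_by_bfs_py_alt edges root
instance (edges : List (String × String)) (root : String) (out : List (String × Int)) : Decidable (Spec_layer_by_bfs_py edges root out) := by unfold Spec_layer_by_bfs_py; infer_instance

-- ===== CLAIM (what is proved, stated in full; the proofs are below) =====
def Claim_equal_layer_by_bfs_py : Prop := ∀ (edges : List (String × String)) (root : String), Dom_layer_by_bfs_py edges root → Spec_layer_by_bfs_py edges root (layer_by_bfs_py edges root)

-- ===== LEMMAS AND PROOFS =====

-- proof-side abbreviations: A's inner step, the level-synchronous ghost's inner step, B's prune step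
def pvStepA (d : Int) (st : PySem.Dict String Int × List (String × Int)) (v : String) :
    PySem.Dict String Int × List (String × Int) :=
  if PySem.Dict.contains st.1 v then st
  else (PySem.Dict.insert st.1 v (d + 1), st.2 ++ [(v, d + 1)])

def pvStepB (d : Int) (st : PySem.Dict String Int × List String) (v : String) :
    PySem.Dict String Int × List String :=
  if PySem.Dict.contains st.1 v then st
  else (PySem.Dict.insert st.1 v (d + 1), st.2 ++ [v])

def pvStep2 (st : List String × PySem.Set String) (v : String) :
    List String × PySem.Set String :=
  if PySem.Set.contains st.2 v then st else (st.1 ++ [v], PySem.Set.add st.2 v)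

def pvLevelB (adj : PySem.Dict String (PySem.Set String)) (d : Int)
    (cur : List String) (st : PySem.Dict String Int × List String) :
    PySem.Dict String Int × List String :=
  cur.foldl (fun st u => (PySem.Dict.getD adj u PySem.Set.empty).foldl (pvStepB d) st) st

def pvLevel2 (adj : PySem.Dict String (PySem.Set String))
    (cur : List String) (st : List String × PySem.Set String) :
    List String × PySem.Set String :=
  cur.foldl (fun st u => (PySem.Dict.getD adj u PySem.Set.empty).foldl pvStep2 st) st

-- level-synchronous ghost between A and B (proof-only)
def pvBfsB (adj : PySem.Dict String (PySem.Set String)) :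
    Nat → PySem.Dict String Int → List String → Int → PySem.Dict String Int
  | 0, layer, _, _ => layer
  | fuel + 1, layer, frontier, d =>
    if frontier.isEmpty then layer
    else
      let st := pvLevelB adj d frontier (layer, [])
      pvBfsB adj fuel st.1 st.2 (d + 1)

-- flatten levels into (node, depth) pairs, depths counting up from d
def pvTag : Int → List (List String) → List (String × Int)
  | _, [] => []
  | d, lvl :: rest => lvl.map (fun v => (v, d)) ++ pvTag (d + 1) rest

theorem pvTag_cons (d : Int) (lvl : List String) (rest : List (List String)) :
    pvTag d (lvl :: rest) = lvl.map (fun v => (v, d)) ++ pvTag (d + 1) rest := rfl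

-- number of adj-keys not yet assigned a layer
def pvUn (adj : PySem.Dict String (PySem.Set String)) (layer : PySem.Dict String Int) : Nat :=
  ((PySem.Dict.keys adj).filter (fun k => !(PySem.Dict.contains layer k))).length

theorem pvBfsA_pop (adj : PySem.Dict String (PySem.Set String)) (fuel : Nat)
    (layer : PySem.Dict String Int) (u : String) (d : Int) (rest : List (String × Int)) :
    pvBfsA adj (fuel + 1) layer ((u, d) :: rest) =
      pvBfsA adj fuel ((PySem.Dict.getD adj u PySem.Set.empty).foldl (pvStepA d) (layer, rest)).1
        ((PySem.Dict.getD adj u PySem.Set.empty).foldl (pvStepA d) (layer, rest)).2 := rfl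

theorem pvBfsB_cons (adj : PySem.Dict String (PySem.Set String)) (fuel : Nat)
    (layer : PySem.Dict String Int) (v : String) (vs : List String) (d : Int) :
    pvBfsB adj (fuel + 1) layer (v :: vs) d =
      pvBfsB adj fuel (pvLevelB adj d (v :: vs) (layer, [])).1
        (pvLevelB adj d (v :: vs) (layer, [])).2 (d + 1) := rfl

theorem pvBfsB_nil (adj : PySem.Dict String (PySem.Set String)) (fuel : Nat)
    (layer : PySem.Dict String Int) (d : Int) :
    pvBfsB adj fuel layer [] d = layer := by
  cases fuel <;> rfl

theorem pvLevels_nil (adj : PySem.Dict String (PySem.Set String)) (fuel : Nat)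
    (seen : PySem.Set String) : pvLevels adj fuel [] seen = [] := by
  cases fuel <;> rfl

theorem pvLevels_succ (adj : PySem.Dict String (PySem.Set String)) (fuel : Nat)
    (frontier : List String) (seen : PySem.Set String) :
    pvLevels adj (fuel + 1) frontier seen =
      if frontier.isEmpty then []
      else frontier :: pvLevels adj fuel (pvLevel2 adj frontier ([], seen)).1
        (pvLevel2 adj frontier ([], seen)).2 := by
  show (if frontier.isEmpty then []
      else frontier :: pvLevels adj fuel
        ((frontier.flatMap (fun u => PySem.Dict.getD adj u PySem.Set.empty)).foldl pvStep2 ([], seen)).1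
        ((frontier.flatMap (fun u => PySem.Dict.getD adj u PySem.Set.empty)).foldl pvStep2 ([], seen)).2) = _
  rw [List.foldl_flatMap]
  rfl

-- the two inner folds run in lock-step: same layer, A's queue tail = prefix ++ B's list tagged d+1
theorem pvInnerRel (d : Int) (ns : List String) :
    ∀ (layer : PySem.Dict String Int) (p : List (String × Int)) (acc : List String),
      ns.foldl (pvStepA d) (layer, p ++ acc.map (fun v => (v, d + 1))) =
        ((ns.foldl (pvStepB d) (layer, acc)).1,
          p ++ ((ns.foldl (pvStepB d) (layer, acc)).2).map (fun v => (v, d + 1))) := by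
  induction ns with
  | nil => intro layer p acc; rfl
  | cons v ns ih =>
    intro layer p acc
    simp only [List.foldl_cons]
    by_cases h : PySem.Dict.contains layer v = true
    · rw [show pvStepA d (layer, p ++ acc.map (fun v => (v, d + 1))) v
            = (layer, p ++ acc.map (fun v => (v, d + 1))) by simp [pvStepA, h],
          show pvStepB d (layer, acc) v = (layer, acc) by simp [pvStepB, h]]
      exact ih layer p acc
    · rw [show pvStepA d (layer, p ++ acc.map (fun v => (v, d + 1))) v
            = (PySem.Dict.insert layer v (d + 1),
               p ++ (acc ++ [v]).map (fun v => (v, d + 1))) by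
            simp [pvStepA, h, List.append_assoc],
          show pvStepB d (layer, acc) v = (PySem.Dict.insert layer v (d + 1), acc ++ [v]) by
            simp [pvStepB, h]]
      exact ih _ p (acc ++ [v])

-- inserting a fresh key removes exactly one unvisited key
theorem pvUn_insert (l : List String) (hl : l.Nodup) (x : String) (hx : x ∈ l)
    (layer : PySem.Dict String Int) (hnc : PySem.Dict.contains layer x = false) (w : Int) :
    ((l.filter (fun k => !(PySem.Dict.contains (PySem.Dict.insert layer x w) k))).length) + 1 =
      (l.filter (fun k => !(PySem.Dict.contains layer k))).length := by
  induction l with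
  | nil => exact absurd hx (List.not_mem_nil)
  | cons y l ih =>
    by_cases hyx : y = x
    · subst hyx
      have hxl : y ∉ l := (List.nodup_cons.mp hl).1
      simp only [List.filter_cons, PySem.Dict.contains_insert_self, hnc,
        Bool.not_true, Bool.not_false, if_true]
      have hcongr : l.filter (fun k => !(PySem.Dict.contains (PySem.Dict.insert layer y w) k))
          = l.filter (fun k => !(PySem.Dict.contains layer k)) := by
        apply List.filter_congr
        intro k hk
        have hky : k ≠ y := fun h => hxl (h ▸ hk)
        simp [PySem.Dict.contains_insert, hky]
      rw [hcongr]
      simp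
    · have hpred : PySem.Dict.contains (PySem.Dict.insert layer x w) y
          = PySem.Dict.contains layer y := by
        simp [PySem.Dict.contains_insert, hyx]
      have hx' : x ∈ l := by
        rcases List.mem_cons.mp hx with h | h
        · exact absurd h.symm hyx
        · exact h
      have ihl := ih (List.nodup_cons.mp hl).2 hx'
      simp only [List.filter_cons, hpred]
      by_cases hcy : PySem.Dict.contains layer y = true
      · simp only [hcy, Bool.not_true]
        exact ihl
      · simp only [Bool.not_eq_true] at hcy
        simp only [hcy, Bool.not_false, if_true, List.length_cons]
        omega

-- ghost's inner fold: unvisited count + emitted length is invariant (neighbours are adj-keys)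
theorem pvInnerB_spec (adj : PySem.Dict String (PySem.Set String))
    (hnd : (PySem.Dict.keys adj).Nodup) (d : Int) (ns : List String)
    (hcl : ∀ v ∈ ns, v ∈ PySem.Dict.keys adj) :
    ∀ (layer : PySem.Dict String Int) (acc : List String),
      pvUn adj (ns.foldl (pvStepB d) (layer, acc)).1 +
        ((ns.foldl (pvStepB d) (layer, acc)).2).length =
      pvUn adj layer + acc.length := by
  induction ns with
  | nil => intro layer acc; rfl
  | cons v ns ih =>
    intro layer acc
    have hcl' : ∀ w ∈ ns, w ∈ PySem.Dict.keys adj := fun w hw => hcl w (List.mem_cons_of_mem _ hw)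
    simp only [List.foldl_cons]
    by_cases h : PySem.Dict.contains layer v = true
    · rw [show pvStepB d (layer, acc) v = (layer, acc) by simp [pvStepB, h]]
      exact ih hcl' layer acc
    · simp only [Bool.not_eq_true] at h
      rw [show pvStepB d (layer, acc) v
            = (PySem.Dict.insert layer v (d + 1), acc ++ [v]) by simp [pvStepB, h]]
      have hvk : v ∈ PySem.Dict.keys adj := hcl v List.mem_cons_self
      have hun := pvUn_insert (PySem.Dict.keys adj) hnd v hvk layer h (d + 1)
      have hrec := ih hcl' (PySem.Dict.insert layer v (d + 1)) (acc ++ [v])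
      unfold pvUn at *
      simp only [List.length_append, List.length_cons, List.length_nil] at *
      omega

-- the A-vs-ghost simulation: A's mixed queue  cur@d ++ nxt@(d+1)  versus the ghost mid-level
theorem pvMain (adj : PySem.Dict String (PySem.Set String))
    (hnd : (PySem.Dict.keys adj).Nodup)
    (hcl : ∀ u, ∀ v ∈ PySem.Dict.getD adj u PySem.Set.empty, v ∈ PySem.Dict.keys adj) :
    ∀ (fa : Nat) (cur nxt : List String) (layer : PySem.Dict String Int) (d : Int) (fb : Nat),
      cur.length + nxt.length + pvUn adj layer ≤ fa →
      pvUn adj layer + nxt.length + 1 ≤ fb →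
      pvBfsA adj fa layer (cur.map (fun v => (v, d)) ++ nxt.map (fun v => (v, d + 1))) =
        pvBfsB adj (fb - 1) (pvLevelB adj d cur (layer, nxt)).1
          (pvLevelB adj d cur (layer, nxt)).2 (d + 1) := by
  intro fa
  induction fa with
  | zero =>
    intro cur nxt layer d fb h1 h2
    have hc : cur = [] := List.length_eq_zero_iff.mp (by omega)
    have hn : nxt = [] := List.length_eq_zero_iff.mp (by omega)
    subst hc; subst hn
    simp only [pvLevelB, List.foldl_nil, List.map_nil, List.nil_append]
    rw [pvBfsB_nil]
    rfl
  | succ fa ih =>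
    have step : ∀ (u : String) (cs nxt : List String) (layer : PySem.Dict String Int)
        (d : Int) (fb : Nat),
        (u :: cs).length + nxt.length + pvUn adj layer ≤ fa + 1 →
        pvUn adj layer + nxt.length + 1 ≤ fb →
        pvBfsA adj (fa + 1) layer
            ((u :: cs).map (fun v => (v, d)) ++ nxt.map (fun v => (v, d + 1))) =
          pvBfsB adj (fb - 1) (pvLevelB adj d (u :: cs) (layer, nxt)).1
            (pvLevelB adj d (u :: cs) (layer, nxt)).2 (d + 1) := by
      intro u cs nxt layer d fb h1 h2
      have hq : (u :: cs).map (fun v => (v, d)) ++ nxt.map (fun v => (v, d + 1))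
          = (u, d) :: (cs.map (fun v => (v, d)) ++ nxt.map (fun v => (v, d + 1))) := rfl
      rw [hq, pvBfsA_pop, pvInnerRel d _ layer (cs.map (fun v => (v, d))) nxt]
      have hspec := pvInnerB_spec adj hnd d (PySem.Dict.getD adj u PySem.Set.empty)
        (hcl u) layer nxt
      have hih := ih cs ((PySem.Dict.getD adj u PySem.Set.empty).foldl (pvStepB d) (layer, nxt)).2
        ((PySem.Dict.getD adj u PySem.Set.empty).foldl (pvStepB d) (layer, nxt)).1 d fb
        (by simp only [List.length_cons] at h1; omega)
        (by omega)
      rw [hih]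
      have hlev : pvLevelB adj d (u :: cs)
          (layer, nxt) = pvLevelB adj d cs
            ((PySem.Dict.getD adj u PySem.Set.empty).foldl (pvStepB d) (layer, nxt)) := by
        simp [pvLevelB]
      rw [hlev]
    intro cur nxt layer d fb h1 h2
    cases cur with
    | cons u cs => exact step u cs nxt layer d fb h1 h2
    | nil =>
      cases nxt with
      | nil =>
        simp only [pvLevelB, List.foldl_nil, List.map_nil, List.nil_append]
        rw [pvBfsB_nil]
        rfl
      | cons v vs =>
        have hfb : ∃ k, fb - 1 = k + 1 := by
          refine ⟨fb - 2, ?_⟩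
          simp only [List.length_cons] at h2
          omega
        obtain ⟨k, hk⟩ := hfb
        have hlev0 : pvLevelB adj d ([] : List String) (layer, v :: vs) = (layer, v :: vs) := rfl
        rw [hlev0, hk, pvBfsB_cons]
        have hst := step v vs [] layer (d + 1) (k + 1)
          (by simp only [List.length_cons, List.length_nil] at h1 ⊢; omega)
          (by simp only [List.length_cons, List.length_nil] at h2 ⊢; omega)
        simp only [List.map_nil, List.append_nil, List.nil_append] at hst ⊢
        rw [hst]
        simp

theorem pvBuildAdj_props (edges : List (String × String)) :
    (PySem.Dict.keys (pvBuildAdj edges)).Nodup ∧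
    (∀ u, ∀ v ∈ PySem.Dict.getD (pvBuildAdj edges) u PySem.Set.empty,
        v ∈ PySem.Dict.keys (pvBuildAdj edges)) ∧
    (PySem.Dict.keys (pvBuildAdj edges)).length ≤ 2 * edges.length := by
  have aux : ∀ (es : List (String × String)) (adj : PySem.Dict String (PySem.Set String)),
      (PySem.Dict.keys adj).Nodup →
      (∀ u, ∀ v ∈ PySem.Dict.getD adj u PySem.Set.empty, v ∈ PySem.Dict.keys adj) →
      (PySem.Dict.keys (es.foldl (fun adj e =>
          PySem.Dict.setdefault
            (PySem.Dict.insert adj e.1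
              (PySem.Set.add (PySem.Dict.getD adj e.1 PySem.Set.empty) e.2))
            e.2 PySem.Set.empty) adj)).Nodup ∧
      (∀ u, ∀ v ∈ PySem.Dict.getD (es.foldl (fun adj e =>
          PySem.Dict.setdefault
            (PySem.Dict.insert adj e.1
              (PySem.Set.add (PySem.Dict.getD adj e.1 PySem.Set.empty) e.2))
            e.2 PySem.Set.empty) adj) u PySem.Set.empty,
          v ∈ PySem.Dict.keys (es.foldl (fun adj e =>
          PySem.Dict.setdefault
            (PySem.Dict.insert adj e.1
              (PySem.Set.add (PySem.Dict.getD adj e.1 PySem.Set.empty) e.2))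
            e.2 PySem.Set.empty) adj)) ∧
      (PySem.Dict.keys (es.foldl (fun adj e =>
          PySem.Dict.setdefault
            (PySem.Dict.insert adj e.1
              (PySem.Set.add (PySem.Dict.getD adj e.1 PySem.Set.empty) e.2))
            e.2 PySem.Set.empty) adj)).length ≤ (PySem.Dict.keys adj).length + 2 * es.length := by
    intro es
    induction es with
    | nil => intro adj h1 h2; exact ⟨h1, h2, by simp⟩
    | cons e es ih =>
      intro adj h1 h2
      simp only [List.foldl_cons]
      set S := PySem.Set.add (PySem.Dict.getD adj e.1 PySem.Set.empty) e.2 with hS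
      set D1 := PySem.Dict.insert adj e.1 S with hD1
      have hD1nodup : (PySem.Dict.keys D1).Nodup := PySem.Dict.nodup_keys_insert adj e.1 S h1
      have hD1len : (PySem.Dict.keys D1).length ≤ (PySem.Dict.keys adj).length + 1 := by
        by_cases hc : PySem.Dict.contains adj e.1 = true
        · rw [PySem.Dict.keys_insert_of_contains adj S hc]; omega
        · rw [PySem.Dict.keys_insert_of_not_contains adj S (by simpa using hc)]
          simp
      have hmemD1 : ∀ w, w ∈ PySem.Dict.keys adj → w ∈ PySem.Dict.keys D1 := by
        intro w hw; exact (PySem.Dict.mem_keys_insert adj e.1 w S).mpr (Or.inr hw)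
      have hSmem : ∀ v ∈ S, v ∈ PySem.Dict.keys D1 ∨ v = e.2 := by
        intro v hv
        rcases (PySem.Set.mem_add (PySem.Dict.getD adj e.1 PySem.Set.empty) e.2 v).mp hv with h | h
        · exact Or.inl (hmemD1 v (h2 e.1 v h))
        · exact Or.inr h
      have hgetD1 : ∀ u, PySem.Dict.getD D1 u PySem.Set.empty
          = if u = e.1 then S else PySem.Dict.getD adj u PySem.Set.empty := by
        intro u; exact PySem.Dict.getD_insert adj e.1 u S PySem.Set.empty
      by_cases hc2 : PySem.Dict.contains D1 e.2 = true
      · rw [PySem.Dict.setdefault_of_contains D1 PySem.Set.empty hc2]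
        refine ih D1 hD1nodup ?_ |>.imp id (fun h => h.imp id (fun h => by
          simp only [List.length_cons]; omega))
        intro u v hv
        rw [hgetD1 u] at hv
        by_cases hu : u = e.1
        · rw [if_pos hu] at hv
          rcases hSmem v hv with h | h
          · exact h
          · rw [h]; exact (PySem.Dict.contains_iff_mem_keys D1 e.2).mp hc2
        · rw [if_neg hu] at hv
          exact hmemD1 v (h2 u v hv)
      · have hc2' : PySem.Dict.contains D1 e.2 = false := by simpa using hc2
        rw [PySem.Dict.setdefault_of_not_contains D1 PySem.Set.empty hc2']
        set D2 := PySem.Dict.insert D1 e.2 PySem.Set.empty with hD2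
        have hD2nodup : (PySem.Dict.keys D2).Nodup :=
          PySem.Dict.nodup_keys_insert D1 e.2 _ hD1nodup
        have hD2len : (PySem.Dict.keys D2).length ≤ (PySem.Dict.keys adj).length + 2 := by
          rw [PySem.Dict.keys_insert_of_not_contains D1 _ hc2']
          simp only [List.length_append, List.length_cons, List.length_nil]
          omega
        refine ih D2 hD2nodup ?_ |>.imp id (fun h => h.imp id (fun h => by
          simp only [List.length_cons]; omega))
        intro u v hv
        have hgetD2 : PySem.Dict.getD D2 u PySem.Set.empty
            = if u = e.2 then PySem.Set.empty else PySem.Dict.getD D1 u PySem.Set.empty :=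
          PySem.Dict.getD_insert D1 e.2 u PySem.Set.empty PySem.Set.empty
        rw [hgetD2] at hv
        by_cases hu : u = e.2
        · rw [if_pos hu] at hv
          exact absurd hv (List.not_mem_nil)
        · rw [if_neg hu] at hv
          rw [hgetD1 u] at hv
          have hmemD2 : ∀ w, w ∈ PySem.Dict.keys D1 → w ∈ PySem.Dict.keys D2 := by
            intro w hw; exact (PySem.Dict.mem_keys_insert D1 e.2 w _).mpr (Or.inr hw)
          by_cases hu1 : u = e.1
          · rw [if_pos hu1] at hv
            rcases hSmem v hv with h | h
            · exact hmemD2 v h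
            · rw [h]; exact (PySem.Dict.mem_keys_insert D1 e.2 e.2 _).mpr (Or.inl rfl)
          · rw [if_neg hu1] at hv
            exact hmemD2 v (hmemD1 v (h2 u v hv))
  have h := aux edges PySem.Dict.empty (PySem.Dict.nodup_keys_empty)
    (by intro u v hv; rw [PySem.Dict.getD_empty] at hv; exact absurd hv (List.not_mem_nil))
  simpa [pvBuildAdj, PySem.Dict.keys_empty] using h

-- ghost inner fold vs B's prune fold, joint induction: same emitted list, items append, same keys
theorem pvPL1 (d : Int) (ns : List String) :
    ∀ (layer : PySem.Dict String Int) (o : List String) (seen : PySem.Set String),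
      (∀ v, v ∈ seen ↔ PySem.Dict.contains layer v = true) →
      ∃ fresh : List String,
        (ns.foldl (pvStepB d) (layer, o)).2 = o ++ fresh ∧
        (ns.foldl pvStep2 (o, seen)).1 = o ++ fresh ∧
        (ns.foldl (pvStepB d) (layer, o)).1.items
          = layer.items ++ fresh.map (fun v => (v, d + 1)) ∧
        (∀ v, v ∈ (ns.foldl pvStep2 (o, seen)).2 ↔
          PySem.Dict.contains (ns.foldl (pvStepB d) (layer, o)).1 v = true) := by
  induction ns with
  | nil =>
    intro layer o seen hC
    exact ⟨[], by simp, by simp, by simp, hC⟩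
  | cons v ns ih =>
    intro layer o seen hC
    simp only [List.foldl_cons]
    by_cases h : PySem.Dict.contains layer v = true
    · have hs : v ∈ seen := (hC v).mpr h
      rw [show pvStepB d (layer, o) v = (layer, o) by simp [pvStepB, h],
          show pvStep2 (o, seen) v = (o, seen) by simp [pvStep2, hs]]
      exact ih layer o seen hC
    · have h' : PySem.Dict.contains layer v = false := by simpa using h
      have hs' : v ∉ seen := fun hv => h ((hC v).mp hv)
      rw [show pvStepB d (layer, o) v = (PySem.Dict.insert layer v (d + 1), o ++ [v]) by
            simp [pvStepB, h'],
          show pvStep2 (o, seen) v = (o ++ [v], PySem.Set.add seen v) by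
            simp [pvStep2, hs']]
      have hC' : ∀ w, w ∈ PySem.Set.add seen v ↔
          PySem.Dict.contains (PySem.Dict.insert layer v (d + 1)) w = true := by
        intro w
        rw [PySem.Set.mem_add]
        simp only [PySem.Dict.contains_insert, Bool.or_eq_true, beq_iff_eq]
        rw [hC w]
        tauto
      obtain ⟨fresh, h1, h2, h3, h4⟩ := ih (PySem.Dict.insert layer v (d + 1)) (o ++ [v])
        (PySem.Set.add seen v) hC'
      refine ⟨v :: fresh, ?_, ?_, ?_, h4⟩
      · rw [h1]; simp
      · rw [h2]; simp
      · rw [h3]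
        simp [PySem.Dict.items_insert, h']

-- lifted to a whole level (nested over the frontier)
theorem pvPLL (adj : PySem.Dict String (PySem.Set String)) (d : Int) (us : List String) :
    ∀ (layer : PySem.Dict String Int) (o : List String) (seen : PySem.Set String),
      (∀ v, v ∈ seen ↔ PySem.Dict.contains layer v = true) →
      ∃ fresh : List String,
        (pvLevelB adj d us (layer, o)).2 = o ++ fresh ∧
        (pvLevel2 adj us (o, seen)).1 = o ++ fresh ∧
        (pvLevelB adj d us (layer, o)).1.items
          = layer.items ++ fresh.map (fun v => (v, d + 1)) ∧
        (∀ v, v ∈ (pvLevel2 adj us (o, seen)).2 ↔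
          PySem.Dict.contains (pvLevelB adj d us (layer, o)).1 v = true) := by
  induction us with
  | nil =>
    intro layer o seen hC
    exact ⟨[], by simp [pvLevelB], by simp [pvLevel2], by simp [pvLevelB], by
      simpa [pvLevelB, pvLevel2] using hC⟩
  | cons u us ih =>
    intro layer o seen hC
    obtain ⟨f1, h1, h2, h3, h4⟩ :=
      pvPL1 d (PySem.Dict.getD adj u PySem.Set.empty) layer o seen hC
    set g1 := (PySem.Dict.getD adj u PySem.Set.empty).foldl (pvStepB d) (layer, o) with hg1
    set b1 := (PySem.Dict.getD adj u PySem.Set.empty).foldl pvStep2 (o, seen) with hb1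
    have hgpair : g1 = (g1.1, o ++ f1) := by rw [← h1]
    have hbpair : b1 = (o ++ f1, b1.2) := by rw [← h2]
    have hLB : pvLevelB adj d (u :: us) (layer, o) = pvLevelB adj d us (g1.1, o ++ f1) := by
      rw [← hgpair]; simp [pvLevelB, hg1]
    have hL2 : pvLevel2 adj (u :: us) (o, seen) = pvLevel2 adj us (o ++ f1, b1.2) := by
      rw [← hbpair]; simp [pvLevel2, hb1]
    obtain ⟨f2, k1, k2, k3, k4⟩ := ih g1.1 (o ++ f1) b1.2 h4
    refine ⟨f1 ++ f2, ?_, ?_, ?_, ?_⟩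
    · rw [hLB, k1]; simp
    · rw [hL2, k2]; simp
    · rw [hLB, k3, h3]; simp
    · intro v; rw [hLB, hL2]; exact k4 v

-- unvisited count over a whole ghost level
theorem pvUnLevel (adj : PySem.Dict String (PySem.Set String))
    (hnd : (PySem.Dict.keys adj).Nodup)
    (hcl : ∀ u, ∀ v ∈ PySem.Dict.getD adj u PySem.Set.empty, v ∈ PySem.Dict.keys adj)
    (d : Int) (us : List String) :
    ∀ (layer : PySem.Dict String Int) (o : List String),
      pvUn adj (pvLevelB adj d us (layer, o)).1 + (pvLevelB adj d us (layer, o)).2.length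
        = pvUn adj layer + o.length := by
  induction us with
  | nil => intro layer o; simp [pvLevelB]
  | cons u us ih =>
    intro layer o
    have hspec := pvInnerB_spec adj hnd d (PySem.Dict.getD adj u PySem.Set.empty)
      (hcl u) layer o
    set g1 := (PySem.Dict.getD adj u PySem.Set.empty).foldl (pvStepB d) (layer, o) with hg1
    have hLB : pvLevelB adj d (u :: us) (layer, o) = pvLevelB adj d us (g1.1, g1.2) := by
      simp [pvLevelB, hg1]
    rw [hLB]
    have := ih g1.1 g1.2
    omega

-- ghost result as the tagged flattening of B's levels
theorem pvL (adj : PySem.Dict String (PySem.Set String))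
    (hnd : (PySem.Dict.keys adj).Nodup)
    (hcl : ∀ u, ∀ v ∈ PySem.Dict.getD adj u PySem.Set.empty, v ∈ PySem.Dict.keys adj) :
    ∀ (fuel : Nat) (frontier : List String) (seen : PySem.Set String)
      (layer : PySem.Dict String Int) (d : Int),
      (∀ v, v ∈ seen ↔ PySem.Dict.contains layer v = true) →
      pvUn adj layer + 2 ≤ fuel →
      (pvBfsB adj fuel layer frontier d).items
        = layer.items ++ pvTag (d + 1) ((pvLevels adj fuel frontier seen).drop 1) := by
  intro fuel
  induction fuel with
  | zero => intro frontier seen layer d hC hfuel; omega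
  | succ fuel ih =>
    intro frontier seen layer d hC hfuel
    cases frontier with
    | nil =>
      rw [pvBfsB_nil, pvLevels_nil]
      simp [pvTag]
    | cons v vs =>
      rw [pvBfsB_cons, pvLevels_succ, if_neg (by simp)]
      obtain ⟨fresh, h1, h2, h3, h4⟩ := pvPLL adj d (v :: vs) layer [] seen hC
      simp only [List.nil_append] at h1 h2 h3
      have hUn := pvUnLevel adj hnd hcl d (v :: vs) layer []
      simp only [List.drop_succ_cons, List.drop_zero]
      rw [h1, h2]
      cases hf : fresh with
      | nil =>
        subst hf
        rw [pvBfsB_nil, pvLevels_nil]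
        simp [pvTag, h3]
      | cons w ws =>
        have hlen : (pvLevelB adj d (v :: vs) (layer, [])).2.length = fresh.length := by
          rw [h1]
        have hUn2 : pvUn adj (pvLevelB adj d (v :: vs) (layer, [])).1 + fresh.length
            = pvUn adj layer := by
          rw [← hlen]; simpa using hUn
        have hfl : 1 ≤ fresh.length := by rw [hf]; simp
        have hih := ih fresh (pvLevel2 adj (v :: vs) ([], seen)).2
          (pvLevelB adj d (v :: vs) (layer, [])).1 (d + 1) h4 (by omega)
        rw [← hf, hih, h3]
        obtain ⟨k, hk⟩ : ∃ k, fuel = k + 1 := ⟨fuel - 1, by omega⟩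
        subst hk
        rw [pvLevels_succ adj k fresh _, if_neg (by rw [hf]; simp)]
        rw [pvTag_cons]
        simp

-- B's prune fold appends exactly the fresh elements, to the output list and to the seen set alike
theorem pvF (ns : List String) :
    ∀ (o : List String) (seen : PySem.Set String),
      ∃ fresh : List String,
        ns.foldl pvStep2 (o, seen) = (o ++ fresh, seen ++ fresh) ∧
        fresh.Nodup ∧ ∀ v ∈ fresh, v ∉ seen := by
  induction ns with
  | nil =>
    intro o seen
    exact ⟨[], by simp, by simp, by simp⟩
  | cons v ns ih =>
    intro o seen
    simp only [List.foldl_cons]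
    by_cases hs : v ∈ seen
    · rw [show pvStep2 (o, seen) v = (o, seen) by simp [pvStep2, hs]]
      exact ih o seen
    · rw [show pvStep2 (o, seen) v = (o ++ [v], PySem.Set.add seen v) by simp [pvStep2, hs],
          show PySem.Set.add seen v = seen ++ [v] from PySem.Set.add_of_not_mem hs]
      obtain ⟨fresh, h1, h2, h3⟩ := ih (o ++ [v]) (seen ++ [v])
      refine ⟨v :: fresh, ?_, ?_, ?_⟩
      · rw [h1]; simp
      · exact List.nodup_cons.mpr ⟨fun hv => (h3 v hv) (by simp), h2⟩
      · intro w hw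
        rcases List.mem_cons.mp hw with h | h
        · exact h ▸ hs
        · exact fun hws => (h3 w h) (by simp [hws])

theorem pvFL (adj : PySem.Dict String (PySem.Set String)) (us : List String) :
    ∀ (o : List String) (seen : PySem.Set String),
      ∃ fresh : List String,
        pvLevel2 adj us (o, seen) = (o ++ fresh, seen ++ fresh) ∧
        fresh.Nodup ∧ ∀ v ∈ fresh, v ∉ seen := by
  induction us with
  | nil =>
    intro o seen
    exact ⟨[], by simp [pvLevel2], by simp, by simp⟩
  | cons u us ih =>
    intro o seen
    obtain ⟨f1, h1, h2, h3⟩ := pvF (PySem.Dict.getD adj u PySem.Set.empty) o seen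
    have hL2 : pvLevel2 adj (u :: us) (o, seen) = pvLevel2 adj us (o ++ f1, seen ++ f1) := by
      rw [← h1]; simp [pvLevel2]
    obtain ⟨f2, k1, k2, k3⟩ := ih (o ++ f1) (seen ++ f1)
    refine ⟨f1 ++ f2, ?_, ?_, ?_⟩
    · rw [hL2, k1]; simp
    · exact List.Nodup.append h2 k2
        (fun w hw hw2 => (k3 w hw2) (List.mem_append_right seen hw))
    · intro w hw
      rcases List.mem_append.mp hw with h | h
      · exact h3 w h
      · exact fun hws => (k3 w h) (by simp [hws])

-- the flattened levels are distinct nodes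
theorem pvND (adj : PySem.Dict String (PySem.Set String)) :
    ∀ (fuel : Nat) (frontier : List String) (seen : PySem.Set String),
      frontier.Nodup → (∀ v ∈ frontier, v ∈ seen) →
      (pvLevels adj fuel frontier seen).flatten.Nodup ∧
      ∀ v ∈ (pvLevels adj fuel frontier seen).flatten, v ∈ frontier ∨ v ∉ seen := by
  intro fuel
  induction fuel with
  | zero => intro frontier seen _ _; simp [pvLevels]
  | succ fuel ih =>
    intro frontier seen hfnd hfseen
    rw [pvLevels_succ]
    by_cases hfe : frontier.isEmpty
    · simp [hfe]
    · rw [if_neg hfe]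
      obtain ⟨fresh, h1, h2, h3⟩ := pvFL adj frontier [] seen
      rw [h1]
      simp only [List.nil_append, List.flatten_cons]
      have ihr := ih fresh (seen ++ fresh) h2 (fun v hv => List.mem_append_right seen hv)
      constructor
      · refine List.Nodup.append hfnd ihr.1 ?_
        intro w hw hw2
        rcases ihr.2 w hw2 with h | h
        · exact (h3 w h) (hfseen w hw)
        · exact h (List.mem_append_left fresh (hfseen w hw))
      · intro v hv
        rcases List.mem_append.mp hv with h | h
        · exact Or.inl h
        · rcases ihr.2 v h with h' | h'
          · exact Or.inr (h3 v h')
          · exact Or.inr (fun hvs => h' (List.mem_append_left fresh hvs))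

-- the final dict build over enumerated levels materialises exactly the tagged flattening
theorem pvM : ∀ (lvls : List (List String)) (dct : PySem.Dict String Int) (d : Int),
    lvls.flatten.Nodup →
    (∀ v ∈ lvls.flatten, PySem.Dict.contains dct v = false) →
    ((PySem.List.enumerate lvls d).foldl
        (fun d p => p.2.foldl (fun d n => PySem.Dict.insert d n p.1) d) dct).items
      = dct.items ++ pvTag d lvls := by
  intro lvls
  induction lvls with
  | nil => intro dct d _ _; simp [PySem.List.enumerate_nil, pvTag]
  | cons lvl lvls ih =>
    intro dct d hnodup hfree
    simp only [List.flatten_cons] at hnodup hfree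
    have hlvl : lvl.Nodup := (List.nodup_append.mp hnodup).1
    have hrest : lvls.flatten.Nodup := (List.nodup_append.mp hnodup).2.1
    have hdisj := (List.nodup_append.mp hnodup).2.2
    rw [PySem.List.enumerate_cons, List.foldl_cons]
    have hitems : (lvl.foldl (fun dd n => PySem.Dict.insert dd n d) dct).items
        = dct.items ++ lvl.map (fun n => (n, d)) := by
      have := PySem.Dict.items_foldl_insert_fresh (l := lvl) (k := fun n => n)
        (v := fun _ => d) (d := dct) ?_ ?_
      · simpa using this
      · intro a ha; exact hfree a (List.mem_append_left _ ha)
      · simpa using hlvl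
    have hkeys : ∀ w ∈ lvls.flatten,
        PySem.Dict.contains (lvl.foldl (fun dd n => PySem.Dict.insert dd n d) dct) w = false := by
      intro w hw
      apply Bool.eq_false_iff.mpr
      intro hc
      have hmem := (PySem.Dict.contains_iff_mem_keys _ w).mp hc
      rw [PySem.Dict.keys_foldl_insert] at hmem
      rcases (PySem.Set.mem_update _ _ w).mp hmem with h | h
      · have : PySem.Dict.contains dct w = true := (PySem.Dict.contains_iff_mem_keys dct w).mpr h
        rw [hfree w (List.mem_append_right _ hw)] at this
        exact Bool.false_ne_true this
      · exact hdisj w h w hw rfl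
    rw [ih _ (d + 1) hrest hkeys, hitems]
    simp [pvTag]

theorem pvResolveRoot_mem (adj : PySem.Dict String (PySem.Set String)) (root r : String)
    (h : pvResolveRoot adj root = some r) : r ∈ PySem.Dict.keys adj := by
  unfold pvResolveRoot at h
  by_cases hc : PySem.Dict.contains adj root = true
  · rw [if_pos hc] at h
    have hr := Option.some.inj h
    subst hr
    exact (PySem.Dict.contains_iff_mem_keys adj root).mp hc
  · rw [if_neg hc] at h
    exact List.mem_of_find?_eq_some h

-- ===== VERDICT (by name: the statement is the Claim_ definition above) =====
theorem layer_by_bfs_py_spec : Claim_equal_layer_by_bfs_py := by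
  intro edges root _
  unfold Spec_layer_by_bfs_py layer_by_bfs_py layer_by_bfs_py_alt
  simp only []
  cases hres : pvResolveRoot (pvBuildAdj edges) root with
  | none => rfl
  | some r =>
    obtain ⟨hnd, hcl, hsz⟩ := pvBuildAdj_props edges
    set adj := pvBuildAdj edges with hadj
    set layer0 := PySem.Dict.insert (PySem.Dict.empty : PySem.Dict String Int) r 0 with hl0
    have hr : r ∈ PySem.Dict.keys adj := pvResolveRoot_mem adj root r hres
    have hc0 : PySem.Dict.contains layer0 r = true := by
      rw [hl0]; exact PySem.Dict.contains_insert_self PySem.Dict.empty r 0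
    have hunlt : pvUn adj layer0 < (PySem.Dict.keys adj).length := by
      unfold pvUn
      exact List.length_filter_lt_length_iff_exists.mpr ⟨r, hr, by simp [hc0]⟩
    have hseen : PySem.Set.add PySem.Set.empty r = [r] := by
      simp
    have hC : ∀ v, v ∈ PySem.Set.add PySem.Set.empty r ↔
        PySem.Dict.contains layer0 v = true := by
      intro v
      rw [hseen, hl0]
      simp [PySem.Dict.contains_insert, PySem.Dict.contains_empty]
    have hmain := pvMain adj hnd hcl (2 * edges.length + 1) [r] [] layer0 0
      (2 * edges.length + 1)
      (by simp only [List.length_cons, List.length_nil]; omega)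
      (by simp only [List.length_nil]; omega)
    have hq : ([r].map (fun v => (v, (0 : Int))) ++
        ([] : List String).map (fun v => (v, (0 : Int) + 1))) = [(r, (0 : Int))] := rfl
    rw [hq] at hmain
    have h21 : 2 * edges.length + 1 - 1 = 2 * edges.length := by omega
    rw [h21] at hmain
    have hA : pvBfsA adj (2 * edges.length + 1) layer0 [(r, 0)]
        = pvBfsB adj (2 * edges.length + 1) layer0 [r] 0 := by
      rw [hmain, pvBfsB_cons]
    have hL := pvL adj hnd hcl (2 * edges.length + 1) [r]
      (PySem.Set.add PySem.Set.empty r) layer0 0 hC (by omega)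
    have hND := pvND adj (2 * edges.length + 1) [r] (PySem.Set.add PySem.Set.empty r)
      (by simp) (by intro v hv; rw [hseen]; exact hv)
    have hM := pvM (pvLevels adj (2 * edges.length + 1) [r] (PySem.Set.add PySem.Set.empty r))
      PySem.Dict.empty 0 hND.1 (by intro v _; simp [PySem.Dict.contains_empty])
    show (pvBfsA adj (2 * edges.length + 1) (PySem.Dict.insert PySem.Dict.empty r 0)
        [(r, 0)]).items
      = ((PySem.List.enumerate
            (pvLevels adj (2 * edges.length + 1) [r] (PySem.Set.add PySem.Set.empty r)) 0).foldl
          (fun d p => p.2.foldl (fun d n => PySem.Dict.insert d n p.1) d)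
          PySem.Dict.empty).items
    rw [← hl0, hA, hL, hM]
    rw [pvLevels_succ adj (2 * edges.length) [r] _, if_neg (by simp), pvTag_cons]
    rw [hl0]
    simp [PySem.Dict.items_insert, PySem.Dict.contains_empty]
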